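-- pv_equiv track=rewrite | github.com/shnako/advent-of-code-2021 | day15/solution.py | build_larger_map
-- ===== SOURCE A (Python) =====
-- from copy import deepcopy
--
-- def place_map_tile(risk_map, tile, start_y, start_x):
--     for i in range(len(tile)):
--         for j in range(len(tile[i])):
--             risk_map[start_y + i][start_x + j] = tile[i][j]
--
-- def get_increased_risk_tile(risk_tile):
--     increased_risk_tile = []
--     for i in range(len(risk_tile)):
--         increased_risk_tile.append([])
--         for j in range(len(risk_tile[i])):
--             increased_risk_tile[i].append(risk_tile[i][j] + 1 if risk_tile[i][j] < 9 else 1)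
--     return increased_risk_tile
--
-- def build_larger_map(initial_tile):
--     tile_height = len(initial_tile)
--     tile_width = len(initial_tile[0])
--
--     larger_risk_map = [[0] * tile_width * 5 for _ in range(tile_height * 5)]
--
--     current_tile = initial_tile
--     for i in range(5):
--         previous_vertical_map_tile = deepcopy(current_tile)
--         for j in range(5):
--             place_map_tile(larger_risk_map, current_tile, i * tile_height, j * tile_width)
--             current_tile = get_increased_risk_tile(current_tile)
--         current_tile = get_increased_risk_tile(previous_vertical_map_tile)
--
--     return larger_risk_map
-- ===== SOURCE B (Python) =====
-- def build_larger_map(initial_tile):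
--     h = len(initial_tile)
--     w = len(initial_tile[0])
--
--     def bump(v, n):
--         for _ in range(n):
--             v = v + 1 if v < 9 else 1
--         return v
--
--     return [[bump(initial_tile[y % h][x % w], y // h + x // w)
--              for x in range(w * 5)]
--             for y in range(h * 5)]
-- ===== Notes on version B (the rewrite author's own statement) =====
-- stated objective: simpler
-- what changed: Replaces the 25 tile-stampings with deepcopy and intermediate incremented-tile lists by one double loop over the output coordinates that computes each cell directly from the source cell and its tile distance.
import Mathlib
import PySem

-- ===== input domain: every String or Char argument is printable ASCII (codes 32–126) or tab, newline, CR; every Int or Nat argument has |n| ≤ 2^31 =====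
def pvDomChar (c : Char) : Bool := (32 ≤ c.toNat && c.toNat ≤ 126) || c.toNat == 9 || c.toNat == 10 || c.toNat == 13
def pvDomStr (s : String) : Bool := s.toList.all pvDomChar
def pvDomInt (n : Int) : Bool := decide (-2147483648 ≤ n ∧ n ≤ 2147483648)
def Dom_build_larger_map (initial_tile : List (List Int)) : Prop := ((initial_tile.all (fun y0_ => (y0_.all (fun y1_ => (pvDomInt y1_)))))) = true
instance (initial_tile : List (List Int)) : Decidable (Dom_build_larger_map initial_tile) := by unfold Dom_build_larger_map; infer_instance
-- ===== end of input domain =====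

-- B replaces A's 25 tile-stampings (with deepcopy and intermediate incremented tiles) by one
-- double loop over the output coordinates computing each cell directly (objective: simpler).

-- ===== PORT A =====
-- inner loop of place_map_tile (Python: risk_map[start_y+i][start_x+j] = tile[i][j]);
-- getD/set are exact here because under Pre_ every written index is in range.
def place_row (rm : List (List Int)) (row : List Int) (y sx : Nat) : List (List Int) :=
  (List.range row.length).foldl
    (fun rm j => rm.set y ((rm.getD y []).set (sx + j) (row.getD j 0))) rm

def place_map_tile (rm : List (List Int)) (tile : List (List Int)) (sy sx : Nat) : List (List Int) :=
  (List.range tile.length).foldl (fun rm i => place_row rm (tile.getD i []) (sy + i) sx) rm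

-- Python builds each output row by appending one transformed element per input element = map.
def get_increased_risk_tile (risk_tile : List (List Int)) : List (List Int) :=
  risk_tile.map (fun row => row.map (fun v => if v < 9 then v + 1 else 1))

def build_larger_map (initial_tile : List (List Int)) : List (List Int) :=
  let tile_height := initial_tile.length
  let tile_width := (initial_tile.getD 0 []).length   -- initial_tile[0]: Pre_ excludes []
  let larger_risk_map := List.replicate (tile_height * 5) (List.replicate (tile_width * 5) (0 : Int))
  let res := (List.range 5).foldl
    (fun (s : List (List Int) × List (List Int)) i =>
      let previous_vertical_map_tile := s.2     -- deepcopy of current_tile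
      let s' := (List.range 5).foldl
        (fun (s2 : List (List Int) × List (List Int)) j =>
          (place_map_tile s2.1 s2.2 (i * tile_height) (j * tile_width),
           get_increased_risk_tile s2.2))
        (s.1, s.2)
      (s'.1, get_increased_risk_tile previous_vertical_map_tile))
    (larger_risk_map, initial_tile)
  res.1

-- ===== PORT B =====
def bump (v : Int) (n : Nat) : Int :=
  (List.range n).foldl (fun v _ => if v < 9 then v + 1 else 1) v

def build_larger_map_alt (initial_tile : List (List Int)) : List (List Int) :=
  let h := initial_tile.length
  let w := (initial_tile.getD 0 []).length
  (List.range (h * 5)).map (fun y =>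
    (List.range (w * 5)).map (fun x =>
      bump ((initial_tile.getD (y % h) []).getD (x % w) 0) (y / h + x / w)))

-- ===== PRECONDITION & SPEC =====
-- Pre_ excludes the empty list (A raises IndexError on initial_tile[0]) and non-rectangular input:
-- there A either raises IndexError (a row longer than the first) or returns a grid with leftover
-- zero filler from its pre-allocated map (rows shorter than the first), where B raises IndexError.
def Pre_build_larger_map (initial_tile : List (List Int)) : Prop :=
  initial_tile ≠ [] ∧ ∀ r ∈ initial_tile, r.length = (initial_tile.getD 0 []).length
instance (initial_tile : List (List Int)) : Decidable (Pre_build_larger_map initial_tile) := by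
  unfold Pre_build_larger_map; infer_instance

def pvWitness_build_larger_map : List (List Int) := [[1, 2], [9, 4]]

def Spec_build_larger_map (initial_tile : List (List Int)) (out : List (List Int)) : Prop := out = build_larger_map_alt initial_tile
instance (initial_tile : List (List Int)) (out : List (List Int)) : Decidable (Spec_build_larger_map initial_tile out) := by unfold Spec_build_larger_map; infer_instance

-- ===== CLAIM (what is proved, stated in full; the proofs are below) =====
def Claim_equal_build_larger_map : Prop := ∀ (initial_tile : List (List Int)), Dom_build_larger_map initial_tile → Pre_build_larger_map initial_tile → Spec_build_larger_map initial_tile (build_larger_map initial_tile)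

-- ===== LEMMAS AND PROOFS =====

-- cell access and rectangular shape
def cell (rm : List (List Int)) (y x : Nat) : Int := (rm.getD y []).getD x 0

def Shape (rm : List (List Int)) (h w : Nat) : Prop :=
  rm.length = h ∧ ∀ i, i < h → (rm.getD i []).length = w

-- tile after n wrap-increments
def incN : Nat → List (List Int) → List (List Int)
  | 0, t => t
  | n + 1, t => get_increased_risk_tile (incN n t)

def stepv (v : Int) : Int := if v < 9 then v + 1 else 1

def stepN : Nat → Int → Int
  | 0, v => v
  | n + 1, v => stepv (stepN n v)

theorem bump_eq_stepN (v : Int) (n : Nat) : bump v n = stepN n v := by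
  induction n with
  | zero => rfl
  | succ n ih =>
      simp [bump, List.range_succ, List.foldl_append] at *
      simp [ih, stepN, stepv]

theorem shape_inc {t : List (List Int)} {h w : Nat} (hs : Shape t h w) :
    Shape (get_increased_risk_tile t) h w := by
  obtain ⟨hl, hr⟩ := hs
  refine ⟨by simp [get_increased_risk_tile, hl], ?_⟩
  intro i hi
  have hi' : i < t.length := by omega
  simp [get_increased_risk_tile, List.getD_eq_getElem?_getD,
    List.getElem?_eq_getElem hi']
  have := hr i hi
  simpa [List.getD_eq_getElem?_getD, List.getElem?_eq_getElem hi'] using this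

theorem shape_incN {t : List (List Int)} {h w : Nat} (hs : Shape t h w) (n : Nat) :
    Shape (incN n t) h w := by
  induction n with
  | zero => exact hs
  | succ n ih => exact shape_inc ih

theorem cell_inc {t : List (List Int)} {h w : Nat} (hs : Shape t h w)
    {y x : Nat} (hy : y < h) (hx : x < w) :
    cell (get_increased_risk_tile t) y x = stepv (cell t y x) := by
  obtain ⟨hl, hr⟩ := hs
  have hy' : y < t.length := by omega
  have hx' : x < (t.getD y []).length := by rw [hr y hy]; exact hx
  have hx2 : x < t[y].length := by
    simpa [List.getD_eq_getElem?_getD, List.getElem?_eq_getElem hy'] using hx'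
  simp [get_increased_risk_tile, cell, List.getD_eq_getElem?_getD, List.getElem?_map,
    List.getElem?_eq_getElem hy', List.getElem?_eq_getElem hx2, stepv]

theorem cell_incN {t : List (List Int)} {h w : Nat} (hs : Shape t h w)
    {y x : Nat} (hy : y < h) (hx : x < w) (n : Nat) :
    cell (incN n t) y x = stepN n (cell t y x) := by
  induction n with
  | zero => rfl
  | succ n ih =>
      have := cell_inc (shape_incN hs n) hy hx
      simp [incN, stepN, this, ih]

-- getD after set
theorem getD_set_list {α : Type} [Inhabited α] (l : List α) (i j : Nat) (a : α) (d : α) :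
    (l.set i a).getD j d = if i = j ∧ j < l.length then a else l.getD j d := by
  by_cases hij : i = j
  · subst hij
    by_cases hi : i < l.length
    · simp [List.getD_eq_getElem?_getD, hi]
    · simp [List.getD_eq_getElem?_getD, hi]
  · simp [List.getD_eq_getElem?_getD, List.getElem?_set_ne hij, hij]

theorem place_row_spec (row : List Int) (y sx : Nat) :
    ∀ (n : Nat) (rm : List (List Int)) (h w : Nat), Shape rm h w → y < h → sx + n ≤ w →
      (∀ y' x, cell ((List.range n).foldl
          (fun rm j => rm.set y ((rm.getD y []).set (sx + j) (row.getD j 0))) rm) y' x =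
        if y' = y ∧ sx ≤ x ∧ x < sx + n then row.getD (x - sx) 0 else cell rm y' x) ∧
      Shape ((List.range n).foldl
          (fun rm j => rm.set y ((rm.getD y []).set (sx + j) (row.getD j 0))) rm) h w := by
  intro n
  induction n with
  | zero =>
      intro rm h w hs _ _
      refine ⟨?_, hs⟩
      intro y' x; simp
  | succ n ih =>
      intro rm h w hs hy hn
      obtain ⟨ihc, ihs⟩ := ih rm h w hs hy (by omega)
      set F := (List.range n).foldl
          (fun rm j => rm.set y ((rm.getD y []).set (sx + j) (row.getD j 0))) rm with hF
      have hfold : (List.range (n+1)).foldl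
          (fun rm j => rm.set y ((rm.getD y []).set (sx + j) (row.getD j 0))) rm
          = F.set y ((F.getD y []).set (sx + n) (row.getD n 0)) := by
        rw [List.range_succ, List.foldl_append]; rfl
      obtain ⟨hFl, hFr⟩ := ihs
      have hyF : y < F.length := by omega
      have hwF : (F.getD y []).length = w := hFr y hy
      constructor
      · intro y' x
        rw [hfold, cell, getD_set_list]
        by_cases hyy : y = y'
        · subst hyy
          rw [if_pos ⟨rfl, hyF⟩, getD_set_list, hwF]
          by_cases hx0 : x = sx + n
          · have hxw : x < w := by omega
            rw [if_pos ⟨by omega, hxw⟩,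
              if_pos (⟨rfl, by omega, by omega⟩ : y = y ∧ sx ≤ x ∧ x < sx + (n + 1))]
            have hxs : x - sx = n := by omega
            rw [hxs]
          · rw [if_neg (fun hc => hx0 hc.1.symm)]
            have h1 := ihc y x
            rw [cell] at h1
            rw [h1]
            by_cases hin : sx ≤ x ∧ x < sx + n
            · rw [if_pos ⟨rfl, hin⟩,
                if_pos (⟨rfl, hin.1, by omega⟩ : y = y ∧ sx ≤ x ∧ x < sx + (n + 1))]
            · rw [if_neg (fun hc => hin hc.2),
                if_neg (fun hc => hin ⟨hc.2.1, by have := hc.2.2; omega⟩)]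
        · rw [if_neg (fun hc => hyy hc.1)]
          have h1 := ihc y' x
          rw [cell] at h1
          rw [h1]
          rw [if_neg (fun hc => hyy hc.1.symm), if_neg (fun hc => hyy hc.1.symm)]
      · rw [hfold]
        refine ⟨by simp [hFl], ?_⟩
        intro i hi
        rw [getD_set_list]
        by_cases hiy : y = i ∧ i < F.length
        · rw [if_pos hiy, List.length_set]
          exact hwF
        · rw [if_neg hiy]
          exact hFr i hi

theorem place_row_cell (row : List Int) (y sx : Nat) (rm : List (List Int)) (h w : Nat)
    (hs : Shape rm h w) (hy : y < h) (hn : sx + row.length ≤ w) (y' x : Nat) :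
    cell (place_row rm row y sx) y' x =
      if y' = y ∧ sx ≤ x ∧ x < sx + row.length then row.getD (x - sx) 0 else cell rm y' x :=
  ((place_row_spec row y sx row.length rm h w hs hy hn).1 y' x)

theorem place_row_shape (row : List Int) (y sx : Nat) (rm : List (List Int)) (h w : Nat)
    (hs : Shape rm h w) (hy : y < h) (hn : sx + row.length ≤ w) :
    Shape (place_row rm row y sx) h w :=
  (place_row_spec row y sx row.length rm h w hs hy hn).2

-- place_map_tile of a th×tw rectangular tile
theorem place_tile_spec (tile : List (List Int)) (sy sx th tw : Nat)
    (htile : Shape tile th tw) :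
    ∀ (n : Nat), n ≤ th → ∀ (rm : List (List Int)) (h w : Nat), Shape rm h w →
      sy + th ≤ h → sx + tw ≤ w →
      (∀ y x, cell ((List.range n).foldl
          (fun rm i => place_row rm (tile.getD i []) (sy + i) sx) rm) y x =
        if sy ≤ y ∧ y < sy + n ∧ sx ≤ x ∧ x < sx + tw then cell tile (y - sy) (x - sx)
        else cell rm y x) ∧
      Shape ((List.range n).foldl
          (fun rm i => place_row rm (tile.getD i []) (sy + i) sx) rm) h w := by
  intro n
  induction n with
  | zero =>
      intro _ rm h w hs _ _
      refine ⟨?_, hs⟩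
      intro y x
      rw [List.range_zero, List.foldl_nil, if_neg (by omega)]
  | succ n ih =>
      intro hn rm h w hs hsy hsx
      obtain ⟨ihc, ihs⟩ := ih (by omega) rm h w hs hsy hsx
      set F := (List.range n).foldl
          (fun rm i => place_row rm (tile.getD i []) (sy + i) sx) rm with hF
      have hfold : (List.range (n+1)).foldl
          (fun rm i => place_row rm (tile.getD i []) (sy + i) sx) rm
          = place_row F (tile.getD n []) (sy + n) sx := by
        rw [List.range_succ, List.foldl_append]; rfl
      have hrowlen : (tile.getD n []).length = tw := htile.2 n (by omega)
      have hyF : sy + n < h := by omega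
      have hlen : sx + (tile.getD n []).length ≤ w := by rw [hrowlen]; omega
      constructor
      · intro y x
        rw [hfold, place_row_cell _ _ _ _ h w ihs hyF hlen, ihc y x]
        by_cases hrow : y = sy + n ∧ sx ≤ x ∧ x < sx + (tile.getD n []).length
        · rw [if_pos hrow]
          have hcond : sy ≤ y ∧ y < sy + (n+1) ∧ sx ≤ x ∧ x < sx + tw := by
            rw [hrowlen] at hrow; omega
          rw [if_pos hcond]
          have hys : y - sy = n := by omega
          rw [cell, hys]
        · rw [if_neg hrow]
          rw [hrowlen] at hrow
          by_cases hin : sy ≤ y ∧ y < sy + n ∧ sx ≤ x ∧ x < sx + tw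
          · rw [if_pos hin, if_pos (by omega : sy ≤ y ∧ y < sy + (n+1) ∧ sx ≤ x ∧ x < sx + tw)]
          · rw [if_neg hin, if_neg (by omega : ¬(sy ≤ y ∧ y < sy + (n+1) ∧ sx ≤ x ∧ x < sx + tw))]
      · rw [hfold]
        exact place_row_shape _ _ _ _ h w ihs hyF hlen

theorem place_tile_cell (tile : List (List Int)) (sy sx th tw : Nat)
    (htile : Shape tile th tw) (rm : List (List Int)) (h w : Nat) (hs : Shape rm h w)
    (hsy : sy + th ≤ h) (hsx : sx + tw ≤ w) (y x : Nat) :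
    cell (place_map_tile rm tile sy sx) y x =
      if sy ≤ y ∧ y < sy + th ∧ sx ≤ x ∧ x < sx + tw then cell tile (y - sy) (x - sx)
      else cell rm y x := by
  have h1 := (place_tile_spec tile sy sx th tw htile th (le_refl _) rm h w hs hsy hsx).1 y x
  unfold place_map_tile
  rw [htile.1]
  exact h1

theorem place_tile_shape (tile : List (List Int)) (sy sx th tw : Nat)
    (htile : Shape tile th tw) (rm : List (List Int)) (h w : Nat) (hs : Shape rm h w)
    (hsy : sy + th ≤ h) (hsx : sx + tw ≤ w) :
    Shape (place_map_tile rm tile sy sx) h w := by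
  have h2 := (place_tile_spec tile sy sx th tw htile th (le_refl _) rm h w hs hsy hsx).2
  unfold place_map_tile
  rw [htile.1]
  exact h2

-- the 25 block placements as a fold over the list of block coordinates
def blockStep (t : List (List Int)) (H W : Nat) (rm : List (List Int)) (b : Nat × Nat) :
    List (List Int) :=
  place_map_tile rm (incN (b.1 + b.2) t) (b.1 * H) (b.2 * W)

def blocks25 : List (Nat × Nat) :=
  [(0,0),(0,1),(0,2),(0,3),(0,4),(1,0),(1,1),(1,2),(1,3),(1,4),
   (2,0),(2,1),(2,2),(2,3),(2,4),(3,0),(3,1),(3,2),(3,3),(3,4),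
   (4,0),(4,1),(4,2),(4,3),(4,4)]

theorem build_eq_blocks (t : List (List Int)) :
    build_larger_map t = blocks25.foldl (blockStep t t.length (t.getD 0 []).length)
      (List.replicate (t.length * 5) (List.replicate ((t.getD 0 []).length * 5) (0 : Int))) := by
  rfl

theorem shape_blocks_fold (t : List (List Int)) (H W : Nat) (ht : Shape t H W) :
    ∀ (bs : List (Nat × Nat)) (rm : List (List Int)), Shape rm (5 * H) (5 * W) →
      (∀ b ∈ bs, b.1 < 5 ∧ b.2 < 5) →
      Shape (bs.foldl (blockStep t H W) rm) (5 * H) (5 * W) := by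
  intro bs
  induction bs with
  | nil => intro rm hs _; exact hs
  | cons b bs ih =>
      intro rm hs hb
      have hb1 : b.1 < 5 := (hb b (by simp)).1
      have hb2 : b.2 < 5 := (hb b (by simp)).2
      have hsy : b.1 * H + H ≤ 5 * H := by
        calc b.1 * H + H = (b.1 + 1) * H := by ring
        _ ≤ 5 * H := Nat.mul_le_mul_right H (by omega)
      have hsx : b.2 * W + W ≤ 5 * W := by
        calc b.2 * W + W = (b.2 + 1) * W := by ring
        _ ≤ 5 * W := Nat.mul_le_mul_right W (by omega)
      exact ih _ (place_tile_shape _ _ _ _ _ (shape_incN ht _) rm _ _ hs hsy hsx)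
        (fun b hbmem => hb b (by simp [hbmem]))

theorem cell_blocks_fold (t : List (List Int)) (H W : Nat) (ht : Shape t H W) (hH : 0 < H)
    (y x : Nat) (_hy : y < 5 * H) (hx : x < 5 * W) :
    ∀ (bs : List (Nat × Nat)) (rm : List (List Int)), Shape rm (5 * H) (5 * W) →
      (∀ b ∈ bs, b.1 < 5 ∧ b.2 < 5) →
      cell (bs.foldl (blockStep t H W) rm) y x =
        if (y / H, x / W) ∈ bs then cell (incN (y / H + x / W) t) (y % H) (x % W)
        else cell rm y x := by
  intro bs
  induction bs with
  | nil => intro rm _ _; simp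
  | cons b bs ih =>
      obtain ⟨ba, bb⟩ := b
      intro rm hs hb
      have hb1 : ba < 5 := (hb (ba, bb) (by simp)).1
      have hb2 : bb < 5 := (hb (ba, bb) (by simp)).2
      have hW : 0 < W := by omega
      have htile : Shape (incN (ba + bb) t) H W := shape_incN ht _
      have hsy : ba * H + H ≤ 5 * H := by
        calc ba * H + H = (ba + 1) * H := by ring
        _ ≤ 5 * H := Nat.mul_le_mul_right H (by omega)
      have hsx : bb * W + W ≤ 5 * W := by
        calc bb * W + W = (bb + 1) * W := by ring
        _ ≤ 5 * W := Nat.mul_le_mul_right W (by omega)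
      have hstep : Shape (blockStep t H W rm (ba, bb)) (5 * H) (5 * W) :=
        place_tile_shape _ _ _ _ _ htile rm _ _ hs hsy hsx
      have hcell := place_tile_cell (incN (ba + bb) t) (ba * H) (bb * W) H W htile
        rm _ _ hs hsy hsx y x
      rw [List.foldl_cons, ih (blockStep t H W rm (ba, bb)) hstep
        (fun p hp => hb p (List.mem_cons_of_mem _ hp))]
      by_cases hmem : (y / H, x / W) ∈ bs
      · rw [if_pos hmem, if_pos (List.mem_cons_of_mem _ hmem)]
      · rw [if_neg hmem]
        have hbsr : blockStep t H W rm (ba, bb)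
            = place_map_tile rm (incN (ba + bb) t) (ba * H) (bb * W) := rfl
        rw [hbsr, hcell]
        by_cases heq : y / H = ba ∧ x / W = bb
        · obtain ⟨he1, he2⟩ := heq
          subst he1; subst he2
          have hA : H * (y / H) + y % H = y := Nat.div_add_mod y H
          have hB : y % H < H := Nat.mod_lt y hH
          have hC : W * (x / W) + x % W = x := Nat.div_add_mod x W
          have hD : x % W < W := Nat.mod_lt x hW
          have hcond : y / H * H ≤ y ∧ y < y / H * H + H ∧ x / W * W ≤ x ∧ x < x / W * W + W := by
            rw [Nat.mul_comm (y / H) H, Nat.mul_comm (x / W) W]; omega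
          rw [if_pos hcond, if_pos (List.mem_cons_self)]
          have e1 : y - y / H * H = y % H := by rw [Nat.mul_comm]; omega
          have e2 : x - x / W * W = x % W := by rw [Nat.mul_comm]; omega
          rw [e1, e2]
        · have hnot : ¬ (ba * H ≤ y ∧ y < ba * H + H ∧ bb * W ≤ x ∧ x < bb * W + W) := by
            intro hc
            apply heq
            constructor
            · exact Nat.div_eq_of_lt_le hc.1 (by have := hc.2.1; calc y < ba * H + H := this
                _ = (ba + 1) * H := by ring)
            · exact Nat.div_eq_of_lt_le hc.2.2.1 (by have := hc.2.2.2; calc x < bb * W + W := this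
                _ = (bb + 1) * W := by ring)
          rw [if_neg hnot]
          rw [if_neg ?_]
          intro hmem2
          rcases List.mem_cons.mp hmem2 with h | h
          · exact heq (by simpa [Prod.ext_iff] using h)
          · exact hmem h

theorem shape_replicate (H W : Nat) :
    Shape (List.replicate (H * 5) (List.replicate (W * 5) (0 : Int))) (5 * H) (5 * W) := by
  constructor
  · simp [Nat.mul_comm]
  · intro i hi
    have hi' : i < H * 5 := by omega
    simp [List.getD_eq_getElem?_getD, hi', Nat.mul_comm]

theorem mem_blocks25 (a b : Nat) (ha : a < 5) (hb : b < 5) : (a, b) ∈ blocks25 := by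
  interval_cases a <;> interval_cases b <;> decide

-- ===== VERDICT (by name: the statement is the Claim_ definition above) =====
theorem build_larger_map_spec : Claim_equal_build_larger_map := by
  intro t _ hpre
  obtain ⟨hne, hrect⟩ := hpre
  unfold Spec_build_larger_map
  set H := t.length with hH
  set W := (t.getD 0 []).length with hW
  have hHpos : 0 < H := by
    rw [hH]
    cases t with
    | nil => exact absurd rfl hne
    | cons a l => simp
  have ht : Shape t H W := by
    refine ⟨rfl, ?_⟩
    intro i hi
    have hi' : i < t.length := hi
    have hmem : t[i] ∈ t := List.getElem_mem hi'
    have := hrect t[i] hmem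
    simpa [List.getD_eq_getElem?_getD, List.getElem?_eq_getElem hi'] using this
  rw [build_eq_blocks, ← hH, ← hW]
  have hshape0 := shape_replicate H W
  have hballt : ∀ b ∈ blocks25, b.1 < 5 ∧ b.2 < 5 := by decide
  have hshapeF := shape_blocks_fold t H W ht blocks25 _ hshape0 hballt
  have hrowlen : ∀ (y : Nat), y < 5 * H →
      ((blocks25.foldl (blockStep t H W)
        (List.replicate (H * 5) (List.replicate (W * 5) (0 : Int)))).getD y []).length = 5 * W :=
    hshapeF.2
  apply List.ext_getElem
  · rw [hshapeF.1]
    simp [build_larger_map_alt, ← hH, Nat.mul_comm]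
  · intro y hy1 hy2
    have hylt : y < 5 * H := by rw [← hshapeF.1]; exact hy1
    have hrowget : (blocks25.foldl (blockStep t H W)
        (List.replicate (H * 5) (List.replicate (W * 5) (0 : Int)))).getD y [] =
        (blocks25.foldl (blockStep t H W)
        (List.replicate (H * 5) (List.replicate (W * 5) (0 : Int))))[y] := by
      simp [List.getD_eq_getElem?_getD, List.getElem?_eq_getElem hy1]
    have hrowlen' : ((blocks25.foldl (blockStep t H W)
        (List.replicate (H * 5) (List.replicate (W * 5) (0 : Int))))[y]).length = 5 * W := by
      rw [← hrowget]; exact hrowlen y hylt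
    have haltrow : ∀ (hy' : y < (build_larger_map_alt t).length),
        (build_larger_map_alt t)[y] = (List.range (W * 5)).map
          (fun x => bump ((t.getD (y % H) []).getD (x % W) 0) (y / H + x / W)) := by
      intro hy'
      simp only [build_larger_map_alt, List.getElem_map, List.getElem_range]
      try rfl
    apply List.ext_getElem
    · rw [hrowlen', haltrow hy2]
      simp [Nat.mul_comm]
    · intro x hx1 hx2
      have hxlt : x < 5 * W := by rw [← hrowlen']; exact hx1
      have hWpos : 0 < W := by omega
      have hcellL : (blocks25.foldl (blockStep t H W)
          (List.replicate (H * 5) (List.replicate (W * 5) (0 : Int))))[y][x] =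
          cell (blocks25.foldl (blockStep t H W)
          (List.replicate (H * 5) (List.replicate (W * 5) (0 : Int)))) y x := by
        rw [cell, hrowget]
        simp [List.getD_eq_getElem?_getD, List.getElem?_eq_getElem hx1]
      rw [hcellL]
      rw [cell_blocks_fold t H W ht hHpos y x hylt hxlt blocks25 _ hshape0 hballt]
      have hmem : (y / H, x / W) ∈ blocks25 :=
        mem_blocks25 _ _ (Nat.div_lt_of_lt_mul (by omega)) (Nat.div_lt_of_lt_mul (by omega))
      rw [if_pos hmem]
      rw [cell_incN ht (Nat.mod_lt y hHpos) (Nat.mod_lt x hWpos) (y / H + x / W)]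
      simp only [haltrow hy2, List.getElem_map, List.getElem_range]
      rw [bump_eq_stepN]
      rfl
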